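-- pv_equiv track=rewrite | github.com/ynXiang/LeetCode | 413.ArithmeticSlices/solution.py | getArithmeticSlicesLength
-- ===== SOURCE A (Python) =====
-- def getArithmeticSlicesLength(A):
--     if len(A) < 3:
--         return []
--     i = 2
--     count = []
--     diff = A[1] - A[0]
--     length = 2
--     while i < len(A):
--         if A[i] - A[i-1] == diff:
--             length += 1
--         else:
--             diff = A[i] - A[i-1]
--             if length > 2:
--                 count.append(length)
--                 length = 2
--         i += 1
--     if length > 2:
--         count.append(length)
--     return count
-- ===== SOURCE B (Python) =====
-- def getArithmeticSlicesLength(A):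
--     diffs = [x - y for x, y in zip(A[1:], A)]
--     res = []
--     n = len(diffs)
--     i = 0
--     while i < n:
--         j = i + 1
--         while j < n and diffs[j] == diffs[i]:
--             j += 1
--         if j - i + 1 > 2:
--             res.append(j - i + 1)
--         i = j
--     return res
-- ===== Notes on version B (the rewrite author's own statement) =====
-- stated objective: alternative
-- what changed: B first materialises the difference array, then consumes it run by run with an inner scan that finds each maximal run of equal differences in one jump, instead of A's single stateful pass tracking a running (diff, length) pair over the original array.
import Mathlib
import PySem

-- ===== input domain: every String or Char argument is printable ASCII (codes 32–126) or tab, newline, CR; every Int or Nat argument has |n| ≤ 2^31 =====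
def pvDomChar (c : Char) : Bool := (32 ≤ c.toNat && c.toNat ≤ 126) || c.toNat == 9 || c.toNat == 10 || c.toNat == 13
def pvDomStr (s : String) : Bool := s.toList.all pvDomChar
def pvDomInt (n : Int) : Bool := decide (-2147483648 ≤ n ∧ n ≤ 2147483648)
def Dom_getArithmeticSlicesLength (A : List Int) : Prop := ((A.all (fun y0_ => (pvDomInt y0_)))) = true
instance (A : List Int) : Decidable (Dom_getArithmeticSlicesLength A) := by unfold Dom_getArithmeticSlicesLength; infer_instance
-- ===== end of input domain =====

-- B consumes the difference array run by run (inner scan per maximal run) instead of A's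
-- single stateful pass over the original array; same cost, alternative structure.

-- ===== PORT A =====
-- the while loop of A; indices i-1, i are always in range (2 ≤ i < len A), so A[i] is A.getD i 0
def aLoop (A : List Int) (i : Nat) (diff length : Int) (count : List Int) : List Int :=
  if i < A.length then
    if A.getD i 0 - A.getD (i-1) 0 = diff then
      aLoop A (i+1) diff (length + 1) count
    else
      if length > 2 then
        aLoop A (i+1) (A.getD i 0 - A.getD (i-1) 0) 2 (count ++ [length])
      else
        aLoop A (i+1) (A.getD i 0 - A.getD (i-1) 0) length count
  else
    if length > 2 then count ++ [length] else count
termination_by A.length - i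

def getArithmeticSlicesLength (A : List Int) : List Int :=
  if A.length < 3 then []
  else aLoop A 2 (A.getD 1 0 - A.getD 0 0) 2 []

-- ===== PORT B =====
-- inner while of B: j - i = 1 + number of elements after position i equal to diffs[i]
def countLead (d : Int) : List Int → Nat
  | [] => 0
  | x :: xs => if x = d then countLead d xs + 1 else 0

-- outer while of B: the index i is carried as the suffix `drop i diffs`; each step
-- consumes one maximal run (i := j) and appends j - i + 1 = k + 1 when > 2
def bLoop (diffs : List Int) (res : List Int) : List Int :=
  match diffs with
  | [] => res
  | d :: ds =>
    let k := 1 + countLead d ds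
    bLoop (List.drop k (d :: ds)) (res ++ if ((k : Int) + 1 > 2) then [(k : Int) + 1] else [])
termination_by diffs.length
decreasing_by simp only [List.length_drop, List.length_cons]; omega

def getArithmeticSlicesLength_alt (A : List Int) : List Int :=
  let diffs := List.zipWith (fun x y => x - y) (List.drop 1 A) A   -- zip(A[1:], A)
  bLoop diffs []

-- ===== PRECONDITION & SPEC =====
def Spec_getArithmeticSlicesLength (A : List Int) (out : List Int) : Prop := out = getArithmeticSlicesLength_alt A
instance (A : List Int) (out : List Int) : Decidable (Spec_getArithmeticSlicesLength A out) := by unfold Spec_getArithmeticSlicesLength; infer_instance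

-- ===== CLAIM (what is proved, stated in full; the proofs are below) =====
def Claim_equal_getArithmeticSlicesLength : Prop := ∀ (A : List Int), Dom_getArithmeticSlicesLength A → Spec_getArithmeticSlicesLength A (getArithmeticSlicesLength A)

-- ===== LEMMAS AND PROOFS =====

-- reference recursion over the remaining difference list, mirroring A's loop state
def aRun (ds : List Int) (diff length : Int) (count : List Int) : List Int :=
  match ds with
  | [] => if length > 2 then count ++ [length] else count
  | d :: ds' =>
    if d = diff then aRun ds' diff (length + 1) count
    else
      if length > 2 then aRun ds' d 2 (count ++ [length])
      else aRun ds' d length count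

def diffsOf (A : List Int) : List Int := List.zipWith (fun x y => x - y) (List.drop 1 A) A

theorem diffsOf_length (A : List Int) : (diffsOf A).length = A.length - 1 := by
  simp [diffsOf]

theorem diffsOf_getD (A : List Int) (j : Nat) (h : j + 1 < A.length) :
    (diffsOf A).getD j 0 = A.getD (j+1) 0 - A.getD j 0 := by
  have hj : j < (diffsOf A).length := by rw [diffsOf_length]; omega
  have hj1 : j < (List.drop 1 A).length := by simp; omega
  have hjA : j < A.length := by omega
  rw [List.getD_eq_getElem _ _ hj, List.getD_eq_getElem _ _ (by omega : j + 1 < A.length),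
      List.getD_eq_getElem _ _ hjA]
  simp [diffsOf, List.getElem_zipWith]

theorem aLoop_eq_aRun (A : List Int) (i : Nat) (diff length : Int) (count : List Int)
    (hi : 1 ≤ i) :
    aLoop A i diff length count = aRun (List.drop (i-1) (diffsOf A)) diff length count := by
  by_cases h : i < A.length
  · have hdl : i - 1 < (diffsOf A).length := by rw [diffsOf_length]; omega
    have hdrop : List.drop (i-1) (diffsOf A)
        = (diffsOf A).getD (i-1) 0 :: List.drop i (diffsOf A) := by
      have hi1 : i - 1 + 1 = i := by omega
      rw [List.getD_eq_getElem _ _ hdl, List.drop_eq_getElem_cons hdl, hi1]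
    have hval : (diffsOf A).getD (i-1) 0 = A.getD i 0 - A.getD (i-1) 0 := by
      have := diffsOf_getD A (i-1) (by omega)
      rwa [Nat.sub_add_cancel hi] at this
    rw [aLoop, hdrop, aRun, hval, if_pos h]
    have ih1 := aLoop_eq_aRun A (i+1) diff (length+1) count (by omega)
    have ih2 := aLoop_eq_aRun A (i+1) (A.getD i 0 - A.getD (i-1) 0) 2 (count ++ [length]) (by omega)
    have ih3 := aLoop_eq_aRun A (i+1) (A.getD i 0 - A.getD (i-1) 0) length count (by omega)
    simp only [Nat.add_sub_cancel] at ih1 ih2 ih3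
    split_ifs <;> simp_all
  · have : List.drop (i-1) (diffsOf A) = [] := by
      apply List.drop_eq_nil_of_le
      rw [diffsOf_length]; omega
    rw [aLoop, this, aRun, if_neg h]
termination_by A.length - i

-- processing ds while the current run (value diff) already holds `length ≥ 2` elements:
-- it absorbs the leading diff-run, emits once, then restarts with length 2
theorem aRun_split (ds : List Int) (diff length : Int) (count : List Int) (hlen : 2 ≤ length) :
    aRun ds diff length count =
      (match List.drop (countLead diff ds) ds with
       | [] => if length + countLead diff ds > 2 then count ++ [length + countLead diff ds] else count
       | d :: ds' => aRun ds' d 2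
           (if length + countLead diff ds > 2 then count ++ [length + countLead diff ds] else count)) := by
  induction ds generalizing length with
  | nil => simp [aRun, countLead]
  | cons x xs ih =>
    by_cases hx : x = diff
    · have h1 := ih (length + 1) (by omega)
      simp only [countLead, aRun, hx]
      rw [h1]
      have : length + 1 + (countLead diff xs : Int) = length + ((countLead diff xs : Int) + 1) := by ring
      simp only [this]
      push_cast
      rfl
    · simp only [countLead, Nat.cast_zero, add_zero, List.drop_zero, aRun, if_neg hx]
      by_cases hl : length > 2
      · simp [hl]
      · have : length = 2 := by omega
        simp [this]

theorem bLoop_nil (res : List Int) : bLoop [] res = res := by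
  unfold bLoop
  rfl

theorem bLoop_cons (d : Int) (ds res : List Int) :
    bLoop (d :: ds) res =
      bLoop (List.drop (countLead d ds) ds)
        (res ++ if (2 ≤ 1 + (countLead d ds : Int)) then [1 + (countLead d ds : Int) + 1] else []) := by
  conv_lhs => rw [bLoop.eq_def]
  simp only [gt_iff_lt, Nat.cast_add, Nat.cast_one]
  rw [Nat.add_comm 1 (countLead d ds), List.drop_succ_cons]
  norm_num

theorem aRun_eq_bLoop (n : Nat) (ds : List Int) (d : Int) (res : List Int)
    (hn : ds.length ≤ n) :
    aRun ds d 2 res = bLoop (d :: ds) res := by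
  induction n generalizing ds d res with
  | zero =>
    have : ds = [] := by cases ds <;> simp_all
    subst this
    rw [bLoop_cons]
    simp [aRun, countLead, bLoop_nil]
  | succ n ih =>
    rw [aRun_split ds d 2 res (by omega), bLoop_cons]
    have hk : ((1 + countLead d ds : Int) + 1 > 2) ↔ ((2 : Int) + countLead d ds > 2) := by
      constructor <;> intro h <;> omega
    have hv : (1 + (countLead d ds : Int)) + 1 = 2 + (countLead d ds : Int) := by ring
    cases hdrop : List.drop (countLead d ds) ds with
    | nil =>
      dsimp only
      rw [bLoop_nil]
      split_ifs with h1 h2 h2 <;> simp_all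
    | cons d' ds' =>
      dsimp only
      have hlen : ds'.length ≤ n := by
        have h2 : (List.drop (countLead d ds) ds).length = ds.length - countLead d ds := by simp
        rw [hdrop] at h2
        simp at h2
        omega
      rw [ih ds' d' _ hlen]
      congr 1
      split_ifs with h1 h2 h2 <;> simp_all

-- ===== VERDICT (by name: the statement is the Claim_ definition above) =====
theorem getArithmeticSlicesLength_spec : Claim_equal_getArithmeticSlicesLength := by
  intro A _
  unfold Spec_getArithmeticSlicesLength getArithmeticSlicesLength getArithmeticSlicesLength_alt
  by_cases h : A.length < 3
  · rw [if_pos h]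
    -- diffs has ≤ 1 element: bLoop yields []
    match A, h with
    | [], _ => simp [bLoop_nil]
    | [a], _ => simp [bLoop_nil]
    | [a, b], _ =>
      simp only [List.drop, List.zipWith]
      rw [bLoop_cons]
      simp [countLead, bLoop_nil]
    | a :: b :: c :: t, h => simp at h; omega
  · rw [if_neg h]
    have h1 : 1 ≤ 2 := by omega
    rw [aLoop_eq_aRun A 2 _ 2 [] (by omega)]
    have hdl : 0 < (diffsOf A).length := by rw [diffsOf_length]; omega
    obtain ⟨d0, rest, hds⟩ : ∃ d0 rest, diffsOf A = d0 :: rest := by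
      cases hd : diffsOf A with
      | nil => rw [hd] at hdl; simp at hdl
      | cons x xs => exact ⟨x, xs, rfl⟩
    have hd0 : d0 = A.getD 1 0 - A.getD 0 0 := by
      have := diffsOf_getD A 0 (by omega)
      rw [hds] at this
      simpa using this
    have hdrop1 : List.drop (2-1) (diffsOf A) = rest := by rw [hds]; rfl
    rw [hdrop1, ← hd0, aRun_eq_bLoop rest.length rest d0 [] le_rfl]
    show bLoop (d0 :: rest) [] = bLoop (diffsOf A) []
    rw [hds]
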